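-- pv_equiv track=rewrite | github.com/MrBrantCode/unitest_baseline | mut_generate/mist_train_taco/taco_11294/solution.py | calculate_wet_time
-- ===== SOURCE A (Python) =====
-- def calculate_wet_time(T, D, L, waves):
--     ans = 0
--     r = 0
--
--     for j in range(T):
--         if waves[j] >= L:
--             ans += 1
--             if r < D:
--                 r = D - 1
--         elif r > 0:
--             ans += 1
--             r -= 1
--
--     return max(ans - 1, 0)
-- ===== SOURCE B (Python) =====
-- def calculate_wet_time(T, D, L, waves):
--     # Stateless formulation: second j is wet iff the wave at j is big,
--     # or some earlier big wave i within the window (i + D > j) keeps it wet.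
--     ans = 0
--     for j in range(T):
--         if waves[j] >= L or any(waves[i] >= L and i + D > j for i in range(max(0, j - D + 1), j)):
--             ans += 1
--     return max(ans - 1, 0)
-- ===== Notes on version B (the rewrite author's own statement) =====
-- stated objective: alternative
-- what changed: Replaced the sequential countdown state machine (running remaining-wet counter r) with a stateless per-index predicate: second j is counted iff waves[j] >= L or some earlier big wave i satisfies i + D > j, checked by a windowed backward scan over the reach window.
import Mathlib
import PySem

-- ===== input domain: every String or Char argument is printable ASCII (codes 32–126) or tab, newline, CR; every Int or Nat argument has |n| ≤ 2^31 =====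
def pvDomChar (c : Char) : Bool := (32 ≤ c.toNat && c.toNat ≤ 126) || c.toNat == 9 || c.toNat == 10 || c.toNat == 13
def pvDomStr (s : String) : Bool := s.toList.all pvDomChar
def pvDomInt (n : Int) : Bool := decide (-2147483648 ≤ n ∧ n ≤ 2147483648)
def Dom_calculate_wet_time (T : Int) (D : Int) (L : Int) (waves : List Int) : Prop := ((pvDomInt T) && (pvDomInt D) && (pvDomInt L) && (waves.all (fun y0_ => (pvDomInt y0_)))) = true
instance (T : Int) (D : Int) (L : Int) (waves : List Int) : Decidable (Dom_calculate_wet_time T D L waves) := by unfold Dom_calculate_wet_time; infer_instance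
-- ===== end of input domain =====

-- B replaces A's countdown state machine by a stateless per-index wetness predicate
-- (alternative decomposition, same return value; no speed claim).

-- ===== PORT A =====
-- loop body of A: state (ans, r); waves[j] is in range on Pre_ (outside it Python raises IndexError)
def pvStepA (D L : Int) (waves : List Int) (s : Int × Int) (j : Int) : Int × Int :=
  if PySem.List.pyGetD waves j 0 ≥ L then
    (s.1 + 1, if s.2 < D then D - 1 else s.2)
  else if s.2 > 0 then (s.1 + 1, s.2 - 1)
  else s

def calculate_wet_time (T : Int) (D : Int) (L : Int) (waves : List Int) : Int :=
  max (((PySem.List.pyRange 0 T 1).foldl (pvStepA D L waves) ((0 : Int), (0 : Int))).1 - 1) 0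

-- ===== PORT B =====
-- loop body of B: 'if waves[j] >= L or any(waves[i] >= L and i + D > j for i in range(max(0, j - D + 1), j)): ans += 1'
def pvStepB (D L : Int) (waves : List Int) (ans : Int) (j : Int) : Int :=
  if PySem.List.pyGetD waves j 0 ≥ L ∨
      ((PySem.List.pyRange (max 0 (j - D + 1)) j 1).any
        (fun i => decide (PySem.List.pyGetD waves i 0 ≥ L ∧ i + D > j))) = true
  then ans + 1 else ans

def calculate_wet_time_alt (T : Int) (D : Int) (L : Int) (waves : List Int) : Int :=
  max ((PySem.List.pyRange 0 T 1).foldl (pvStepB D L waves) (0 : Int) - 1) 0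

-- ===== PRECONDITION & SPEC =====
-- Pre_ excludes exactly the inputs on which Python A raises IndexError (waves[j] for some j in range(T) out of range).
def Pre_calculate_wet_time (T : Int) (D : Int) (L : Int) (waves : List Int) : Prop :=
  T ≤ (waves.length : Int)
instance (T : Int) (D : Int) (L : Int) (waves : List Int) : Decidable (Pre_calculate_wet_time T D L waves) := by unfold Pre_calculate_wet_time; infer_instance

def pvWitness_calculate_wet_time : Int × Int × Int × List Int := (2, 2, 0, [1, -1])

def Spec_calculate_wet_time (T : Int) (D : Int) (L : Int) (waves : List Int) (out : Int) : Prop := out = calculate_wet_time_alt T D L waves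
instance (T : Int) (D : Int) (L : Int) (waves : List Int) (out : Int) : Decidable (Spec_calculate_wet_time T D L waves out) := by unfold Spec_calculate_wet_time; infer_instance

-- ===== CLAIM (what is proved, stated in full; the proofs are below) =====
def Claim_equal_calculate_wet_time : Prop := ∀ (T : Int) (D : Int) (L : Int) (waves : List Int), Dom_calculate_wet_time T D L waves → Pre_calculate_wet_time T D L waves → Spec_calculate_wet_time T D L waves (calculate_wet_time T D L waves)

-- ===== LEMMAS AND PROOFS =====

-- Main invariant: over the prefix range(n), A's ans equals B's ans, A's r is
-- nonnegative, and r measures exactly how far the last big wave still reaches.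
lemma pv_main (D L : Int) (waves : List Int) (n : Nat) :
    ((PySem.List.pyRange 0 (n : Int) 1).foldl (pvStepA D L waves) ((0 : Int), (0 : Int))).1
      = (PySem.List.pyRange 0 (n : Int) 1).foldl (pvStepB D L waves) 0
    ∧ 0 ≤ ((PySem.List.pyRange 0 (n : Int) 1).foldl (pvStepA D L waves) ((0 : Int), (0 : Int))).2
    ∧ ∀ k : Int, 1 ≤ k →
        (k ≤ ((PySem.List.pyRange 0 (n : Int) 1).foldl (pvStepA D L waves) ((0 : Int), (0 : Int))).2 ↔
          ∃ i : Int, 0 ≤ i ∧ i < (n : Int) ∧ L ≤ PySem.List.pyGetD waves i 0 ∧ k ≤ i + D - (n : Int)) := by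
  induction n with
  | zero =>
      rw [PySem.List.pyRange_one_eq_nil (by norm_num)]
      refine ⟨rfl, le_refl _, fun k hk => ?_⟩
      simp only [List.foldl_nil]
      constructor
      · intro h; omega
      · rintro ⟨i, h0, h1, _, _⟩; omega
  | succ n ih =>
      obtain ⟨ih1, ih2, ih3⟩ := ih
      have hcast : ((n + 1 : Nat) : Int) = (n : Int) + 1 := by push_cast; ring
      rw [hcast, PySem.List.pyRange_one_succ_right (by positivity)]
      simp only [List.foldl_append, List.foldl_cons, List.foldl_nil]
      set s := (PySem.List.pyRange 0 (n : Int) 1).foldl (pvStepA D L waves) ((0 : Int), (0 : Int)) with hs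
      set b := (PySem.List.pyRange 0 (n : Int) 1).foldl (pvStepB D L waves) 0 with hb
      have hany : (((PySem.List.pyRange (max 0 ((n : Int) - D + 1)) (n : Int) 1).any
            (fun i => decide (PySem.List.pyGetD waves i 0 ≥ L ∧ i + D > (n : Int)))) = true)
          ↔ ∃ i : Int, 0 ≤ i ∧ i < (n : Int) ∧ L ≤ PySem.List.pyGetD waves i 0 ∧ (n : Int) < i + D := by
        simp only [List.any_eq_true, PySem.List.mem_pyRange_one, decide_eq_true_eq]
        constructor
        · rintro ⟨i, ⟨h0, h1⟩, hbig, hd⟩; exact ⟨i, by omega, h1, hbig, hd⟩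
        · rintro ⟨i, h0, h1, hbig, hd⟩; exact ⟨i, ⟨by omega, h1⟩, hbig, hd⟩
      by_cases hbig : PySem.List.pyGetD waves (n : Int) 0 ≥ L
      · -- big wave at n
        rw [show pvStepA D L waves s (n : Int)
              = (s.1 + 1, if s.2 < D then D - 1 else s.2) from by
            simp only [pvStepA]; rw [if_pos hbig],
          show pvStepB D L waves b (n : Int) = b + 1 from by
            simp only [pvStepB]; rw [if_pos (Or.inl hbig)]]
        refine ⟨by rw [ih1], ?_, ?_⟩
        · dsimp only; split_ifs <;> omega
        · intro k hk
          dsimp only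
          by_cases hD : 1 ≤ D
          · have hrD : s.2 < D := by
              by_contra hcon
              push_neg at hcon
              obtain ⟨i, h0, h1, _, h3⟩ := (ih3 s.2 (by omega)).mp le_rfl
              omega
            rw [if_pos hrD]
            constructor
            · intro hkd
              exact ⟨(n : Int), by positivity, by omega, hbig, by omega⟩
            · rintro ⟨i, h0, h1, _, h3⟩; omega
          · have hr0 : s.2 = 0 := by
              by_contra hcon
              obtain ⟨i, h0, h1, _, h3⟩ := (ih3 s.2 (by omega)).mp le_rfl
              omega
            rw [if_neg (by omega)]
            constructor
            · intro h; omega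
            · rintro ⟨i, h0, h1, _, h3⟩; omega
      · by_cases hr : s.2 > 0
        · -- still wet from an earlier big wave
          have hex : ∃ i : Int, 0 ≤ i ∧ i < (n : Int) ∧ L ≤ PySem.List.pyGetD waves i 0 ∧ (n : Int) < i + D := by
            obtain ⟨i, h0, h1, h2, h3⟩ := (ih3 1 le_rfl).mp (by omega)
            exact ⟨i, h0, h1, h2, by omega⟩
          rw [show pvStepA D L waves s (n : Int) = (s.1 + 1, s.2 - 1) from by
                simp only [pvStepA]; rw [if_neg hbig, if_pos hr],
            show pvStepB D L waves b (n : Int) = b + 1 from by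
                simp only [pvStepB]; rw [if_pos (Or.inr (hany.mpr hex))]]
          refine ⟨by rw [ih1], by dsimp only; omega, ?_⟩
          intro k hk
          dsimp only
          constructor
          · intro hkr
            obtain ⟨i, h0, h1, h2, h3⟩ := (ih3 (k + 1) (by omega)).mp (by omega)
            exact ⟨i, h0, by omega, h2, by omega⟩
          · rintro ⟨i, h0, h1, h2, h3⟩
            have hin : i < (n : Int) := by
              rcases lt_or_ge i (n : Int) with h | h
              · exact h
              · exfalso; have : i = (n : Int) := by omega
                rw [this] at h2; exact hbig h2
            have := (ih3 (k + 1) (by omega)).mpr ⟨i, h0, hin, h2, by omega⟩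
            omega
        · -- dry second
          have hnone : ¬ ∃ i : Int, 0 ≤ i ∧ i < (n : Int) ∧ L ≤ PySem.List.pyGetD waves i 0 ∧ (n : Int) < i + D := by
            rintro ⟨i, h0, h1, h2, h3⟩
            have := (ih3 1 le_rfl).mpr ⟨i, h0, h1, h2, by omega⟩
            omega
          rw [show pvStepA D L waves s (n : Int) = s from by
                simp only [pvStepA]; rw [if_neg hbig, if_neg hr],
            show pvStepB D L waves b (n : Int) = b from by
                simp only [pvStepB]
                rw [if_neg]
                rintro (h | h)
                · exact hbig h
                · exact hnone (hany.mp h)]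
          refine ⟨ih1, ih2, ?_⟩
          intro k hk
          constructor
          · intro hkr; omega
          · rintro ⟨i, h0, h1, h2, h3⟩
            have hin : i < (n : Int) := by
              rcases lt_or_ge i (n : Int) with h | h
              · exact h
              · exfalso; have : i = (n : Int) := by omega
                rw [this] at h2; exact hbig h2
            have := (ih3 (k + 1) (by omega)).mpr ⟨i, h0, hin, h2, by omega⟩
            omega

-- ===== VERDICT (by name: the statement is the Claim_ definition above) =====
theorem calculate_wet_time_spec : Claim_equal_calculate_wet_time := by
  intro T D L waves _hDom _hPre
  unfold Spec_calculate_wet_time calculate_wet_time calculate_wet_time_alt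
  by_cases h : T ≤ 0
  · rw [PySem.List.pyRange_one_eq_nil h]; rfl
  · have hT : ((T.toNat : Nat) : Int) = T := Int.toNat_of_nonneg (by omega)
    rw [← hT, (pv_main D L waves T.toNat).1]
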